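-- pv_equiv track=rewrite | github.com/HereComesTheMoon/AdventOfCode2019 | 3.py | filterGood
-- ===== SOURCE A (Python) =====
-- def filterGood(nums: [[...]], pos: int, sieve: ()):
--     results = {
--         k: [] for k in sieve
--     }
--     for x in nums:
--         try:
--             results[x[pos]].append(x)
--         except KeyError:
--             pass
--     return results
-- ===== SOURCE B (Python) =====
-- def filterGood(nums, pos, sieve):
--     # For each allowed key, one independent filter pass over nums.
--     return {k: [x for x in nums if x[pos] == k] for k in sieve}
-- ===== Notes on version B (the rewrite author's own statement) =====
-- stated objective: simpler
-- what changed: A builds a dict of empty buckets and does one guarded pass appending each item into its bucket (KeyError skipped); B does no grouping at all: a dict comprehension over the sieve keys whose value for each key is an independent filter pass over nums selecting items with x[pos] == k.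
import Mathlib
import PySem

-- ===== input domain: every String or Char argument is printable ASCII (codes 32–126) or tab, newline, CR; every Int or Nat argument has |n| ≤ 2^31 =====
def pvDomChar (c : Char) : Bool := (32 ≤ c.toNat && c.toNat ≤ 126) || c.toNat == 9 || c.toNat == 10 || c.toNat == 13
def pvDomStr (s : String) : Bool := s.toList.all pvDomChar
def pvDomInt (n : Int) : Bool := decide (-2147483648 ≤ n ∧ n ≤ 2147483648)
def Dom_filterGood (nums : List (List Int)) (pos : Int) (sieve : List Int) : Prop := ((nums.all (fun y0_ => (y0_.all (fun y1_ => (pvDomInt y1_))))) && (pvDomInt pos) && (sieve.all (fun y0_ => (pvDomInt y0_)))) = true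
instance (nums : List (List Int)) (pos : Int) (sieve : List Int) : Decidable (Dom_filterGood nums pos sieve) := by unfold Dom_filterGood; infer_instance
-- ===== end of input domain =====

-- B replaces A's grouping dict and guarded append loop by a dict comprehension doing one
-- independent filter pass over nums per sieve key (simpler, no grouping state); return-value equivalence.

-- ===== PORT A =====
-- literal port of A: pre-create sieve keys, then append x only when x[pos] is a key (KeyError → pass)
def filterGood (nums : List (List Int)) (pos : Int) (sieve : List Int) : List (Int × List (List Int)) :=
  let results : PySem.Dict Int (List (List Int)) :=
    sieve.foldl (fun d k => d.insert k []) PySem.Dict.empty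
  let results := nums.foldl (fun d x =>
    match PySem.List.pyGet? x pos with
    | none => d          -- IndexError: excluded by Pre_filterGood
    | some key =>
      match d.get? key with
      | none => d        -- except KeyError: pass
      | some l => d.insert key (l ++ [x])) results
  results.items

-- ===== PORT B =====
-- literal port of Source B: dict comprehension over sieve, value = filter pass over nums
def filterGood_alt (nums : List (List Int)) (pos : Int) (sieve : List Int) : List (Int × List (List Int)) :=
  (sieve.foldl (fun r k =>
      r.insert k (nums.filter (fun x => PySem.List.pyGet? x pos == some k)))
    PySem.Dict.empty).items

-- ===== PRECONDITION & SPEC =====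
-- Pre_ excludes exactly the inputs where some x[pos] is out of range, on which Python A raises IndexError.
def Pre_filterGood (nums : List (List Int)) (pos : Int) (sieve : List Int) : Prop :=
  ∀ x ∈ nums, -(x.length : Int) ≤ pos ∧ pos < x.length
instance (nums : List (List Int)) (pos : Int) (sieve : List Int) : Decidable (Pre_filterGood nums pos sieve) := by unfold Pre_filterGood; infer_instance

def pvWitness_filterGood : List (List Int) × Int × List Int := ([[1, 2], [3, 4], [1, 9]], 0, [1, 5])

def Spec_filterGood (nums : List (List Int)) (pos : Int) (sieve : List Int) (out : List (Int × List (List Int))) : Prop := out = filterGood_alt nums pos sieve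
instance (nums : List (List Int)) (pos : Int) (sieve : List Int) (out : List (Int × List (List Int))) : Decidable (Spec_filterGood nums pos sieve out) := by unfold Spec_filterGood; infer_instance

-- ===== CLAIM (what is proved, stated in full; the proofs are below) =====
def Claim_equal_filterGood : Prop := ∀ (nums : List (List Int)) (pos : Int) (sieve : List Int), Dom_filterGood nums pos sieve → Pre_filterGood nums pos sieve → Spec_filterGood nums pos sieve (filterGood nums pos sieve)

-- ===== LEMMAS AND PROOFS =====

-- the items of nums matching key k, in order
def pvGrp (nums : List (List Int)) (pos : Int) (k : Int) : List (List Int) :=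
  nums.filter (fun x => PySem.List.pyGet? x pos == some k)

theorem pvGrp_cons (x : List Int) (nums : List (List Int)) (pos k : Int) :
    pvGrp (x :: nums) pos k =
      (if PySem.List.pyGet? x pos = some k then [x] else []) ++ pvGrp nums pos k := by
  simp only [pvGrp, List.filter_cons]
  split_ifs with h <;> simp_all

-- a fold inserting a key-determined value: lookup characterization
theorem get?_foldl_insert_const (G : Int → List (List Int)) (sieve : List Int)
    (d : PySem.Dict Int (List (List Int))) (k : Int) :
    (sieve.foldl (fun r j => r.insert j (G j)) d).get? k =
      if k ∈ sieve then some (G k) else d.get? k := by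
  induction sieve generalizing d with
  | nil => simp
  | cons s rest ih =>
    simp only [List.foldl_cons, ih, List.mem_cons]
    by_cases hk : k ∈ rest
    · simp [hk]
    · by_cases hs : k = s <;> simp [hk, hs, PySem.Dict.get?_insert]

-- A's loop: value at k grows by the matching items; a missing key stays missing
theorem get?_foldl_stepA (nums : List (List Int)) (pos : Int)
    (d : PySem.Dict Int (List (List Int))) (k : Int) :
    (nums.foldl (fun d x =>
      match PySem.List.pyGet? x pos with
      | none => d
      | some key =>
        match d.get? key with
        | none => d
        | some l => d.insert key (l ++ [x])) d).get? k
      = (d.get? k).map (fun l => l ++ pvGrp nums pos k) := by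
  induction nums generalizing d with
  | nil => simp [pvGrp]
  | cons x nums ih =>
    simp only [List.foldl_cons, ih, pvGrp_cons]
    cases hx : PySem.List.pyGet? x pos with
    | none => simp [hx]
    | some key =>
      simp only [hx]
      cases hd : d.get? key with
      | none =>
        by_cases hk : key = k
        · subst hk; simp [hd]
        · simp [hd, hk]
      | some l =>
        rw [PySem.Dict.get?_insert]
        by_cases hk : k = key
        · subst hk; simp [hd]
        · simp [hk, Ne.symm hk]

-- A's loop never changes the key list (it only overwrites existing keys)
theorem keys_foldl_stepA (nums : List (List Int)) (pos : Int)
    (d : PySem.Dict Int (List (List Int))) :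
    (nums.foldl (fun d x =>
      match PySem.List.pyGet? x pos with
      | none => d
      | some key =>
        match d.get? key with
        | none => d
        | some l => d.insert key (l ++ [x])) d).keys = d.keys := by
  induction nums generalizing d with
  | nil => simp
  | cons x nums ih =>
    simp only [List.foldl_cons, ih]
    cases hx : PySem.List.pyGet? x pos with
    | none => simp
    | some key =>
      simp only [hx]
      cases hd : d.get? key with
      | none => simp
      | some l =>
        rw [PySem.Dict.keys_insert_of_contains]
        rw [PySem.Dict.contains_eq_isSome_get?, hd]; rfl

theorem filterGood_items_eq (nums : List (List Int)) (pos : Int) (sieve : List Int) :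
    filterGood nums pos sieve = (PySem.Set.ofList sieve).map (fun k => (k, pvGrp nums pos k)) := by
  unfold filterGood
  set init : PySem.Dict Int (List (List Int)) :=
    sieve.foldl (fun d k => d.insert k []) PySem.Dict.empty with hinit
  have hkeys_init : init.keys = PySem.Set.ofList sieve := by
    rw [hinit, PySem.Dict.keys_foldl_insert]
    simp [PySem.Dict.keys_empty, PySem.Set.update_nil_left]
  set dA := nums.foldl (fun d x =>
    match PySem.List.pyGet? x pos with
    | none => d
    | some key =>
      match d.get? key with
      | none => d
      | some l => d.insert key (l ++ [x])) init with hdA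
  have hk : dA.keys = PySem.Set.ofList sieve := by
    rw [hdA, keys_foldl_stepA, hkeys_init]
  have hndA : dA.keys.Nodup := by rw [hk]; exact PySem.Set.nodup_ofList sieve
  rw [PySem.Dict.items_eq_map_keys dA hndA [], hk]
  apply List.map_congr_left
  intro k hkmem
  have hks : k ∈ sieve := (PySem.Set.mem_ofList sieve k).mp hkmem
  have hinitk : init.get? k = some [] := by
    rw [hinit, get?_foldl_insert_const (fun _ => [])]
    simp [hks]
  have : dA.getD k [] = pvGrp nums pos k := by
    rw [PySem.Dict.getD_eq_get?_getD, hdA, get?_foldl_stepA, hinitk]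
    simp
  rw [this]

theorem filterGood_alt_items_eq (nums : List (List Int)) (pos : Int) (sieve : List Int) :
    filterGood_alt nums pos sieve = (PySem.Set.ofList sieve).map (fun k => (k, pvGrp nums pos k)) := by
  unfold filterGood_alt
  set dB := sieve.foldl (fun r k =>
      r.insert k (nums.filter (fun x => PySem.List.pyGet? x pos == some k)))
    PySem.Dict.empty with hdB
  have hk : dB.keys = PySem.Set.ofList sieve := by
    rw [hdB, PySem.Dict.keys_foldl_insert]
    simp [PySem.Dict.keys_empty, PySem.Set.update_nil_left]
  have hndB : dB.keys.Nodup := by rw [hk]; exact PySem.Set.nodup_ofList sieve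
  rw [PySem.Dict.items_eq_map_keys dB hndB [], hk]
  apply List.map_congr_left
  intro k hkmem
  have hks : k ∈ sieve := (PySem.Set.mem_ofList sieve k).mp hkmem
  have : dB.getD k [] = pvGrp nums pos k := by
    rw [PySem.Dict.getD_eq_get?_getD, hdB,
      get?_foldl_insert_const (fun j => nums.filter (fun x => PySem.List.pyGet? x pos == some j))]
    simp [hks, pvGrp]
  rw [this]

-- ===== VERDICT (by name: the statement is the Claim_ definition above) =====
theorem filterGood_spec : Claim_equal_filterGood := by
  intro nums pos sieve _ _
  unfold Spec_filterGood
  rw [filterGood_items_eq, filterGood_alt_items_eq]
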